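-- pv_equiv track=rewrite | github.com/adamkopericonplc/adventofcode2025 | 05/05.py | count_candidates_in_ranges
-- ===== SOURCE A (Python) =====
-- def count_candidates_in_ranges(candidates, optimized_ranges):
--     count = 0
--     for candidate in candidates:
--         for start, end in optimized_ranges:
--             if start <= candidate <= end:
--                 count += 1
--                 break
--     return count
-- ===== SOURCE B (Python) =====
-- def count_candidates_in_ranges(candidates, optimized_ranges):
--     # Sort ranges by start, merge overlapping ones once, then binary-search
--     # each candidate in the merged, gap-separated interval list.
--     rs = sorted(optimized_ranges, key=lambda r: r[0])
--     merged = []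
--     cur = None
--     for s, e in rs:
--         if cur is None:
--             cur = (s, e)
--         elif s <= cur[1]:
--             if e > cur[1]:
--                 cur = (cur[0], e)
--         else:
--             merged.append(cur)
--             cur = (s, e)
--     if cur is not None:
--         merged.append(cur)
--     starts = [p[0] for p in merged]
--     ends = [p[1] for p in merged]
--     count = 0
--     for c in candidates:
--         lo, hi = 0, len(merged)
--         while lo < hi:
--             mid = (lo + hi) // 2
--             if starts[mid] <= c:
--                 lo = mid + 1
--             else:
--                 hi = mid
--         if lo > 0 and c <= ends[lo - 1]:
--             count += 1
--     return count
-- ===== Notes on version B (the rewrite author's own statement) =====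
-- stated objective: faster
-- what changed: Instead of scanning the whole range list for every candidate, B sorts the ranges by start once, merges overlapping ranges into a gap-separated list, and binary-searches each candidate in it.
import Mathlib
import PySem

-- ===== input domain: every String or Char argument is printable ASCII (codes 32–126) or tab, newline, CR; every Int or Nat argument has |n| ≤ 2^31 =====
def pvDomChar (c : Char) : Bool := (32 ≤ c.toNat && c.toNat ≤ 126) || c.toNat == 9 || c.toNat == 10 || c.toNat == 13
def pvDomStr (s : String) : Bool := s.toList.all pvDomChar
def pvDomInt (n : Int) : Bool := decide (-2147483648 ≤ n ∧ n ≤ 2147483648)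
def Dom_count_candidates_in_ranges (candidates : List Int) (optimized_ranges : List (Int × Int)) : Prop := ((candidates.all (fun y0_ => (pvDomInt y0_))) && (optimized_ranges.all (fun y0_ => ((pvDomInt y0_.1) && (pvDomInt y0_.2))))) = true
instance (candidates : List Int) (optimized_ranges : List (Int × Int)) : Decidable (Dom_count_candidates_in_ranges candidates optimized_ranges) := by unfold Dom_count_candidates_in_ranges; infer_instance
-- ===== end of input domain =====

-- B replaces A's per-candidate scan of the whole range list by a one-time
-- sort + merge of the ranges followed by a binary search per candidate (faster, asymptotic).


-- ===== PORT A =====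
-- inner 'for start, end … break' loop: returns true as soon as a range contains the candidate
def pvInAny (candidate : Int) : List (Int × Int) → Bool
  | [] => false
  | (s, e) :: rest => if s ≤ candidate ∧ candidate ≤ e then true else pvInAny candidate rest

def count_candidates_in_ranges (candidates : List Int) (optimized_ranges : List (Int × Int)) : Int :=
  candidates.foldl (fun count c => if pvInAny c optimized_ranges then count + 1 else count) 0

-- ===== PORT B =====
-- one step of B's merge loop over the sorted ranges; state = (cur, merged)
def pvMergeStep (st : Option (Int × Int) × List (Int × Int)) (p : Int × Int) :
    Option (Int × Int) × List (Int × Int) :=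
  match st with
  | (none, merged) => (some p, merged)
  | (some (cs, ce), merged) =>
    if p.1 ≤ ce then
      if p.2 > ce then (some (cs, p.2), merged) else (some (cs, ce), merged)
    else (some p, merged ++ [(cs, ce)])

-- trailing 'if cur is not None: merged.append(cur)'
def pvFinish : Option (Int × Int) × List (Int × Int) → List (Int × Int)
  | (none, merged) => merged
  | (some c, merged) => merged ++ [c]

-- B's 'while lo < hi' binary-search loop; (lo+hi)//2 on the reachable nonnegative
-- ints is Nat division; starts[mid] is always in range there, ported as getD
def pvBisect (starts : List Int) (c : Int) (lo hi : Nat) : Nat :=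
  if lo < hi then
    let mid := (lo + hi) / 2
    if starts.getD mid 0 ≤ c then pvBisect starts c (mid + 1) hi else pvBisect starts c lo mid
  else lo
termination_by hi - lo
decreasing_by all_goals omega

def count_candidates_in_ranges_alt (candidates : List Int) (optimized_ranges : List (Int × Int)) : Int :=
  let rs := PySem.List.sorted optimized_ranges (fun p => p.1) false
  let merged := pvFinish (rs.foldl pvMergeStep (none, []))
  let starts := merged.map Prod.fst
  let ends := merged.map Prod.snd
  candidates.foldl (fun count c =>
    let lo := pvBisect starts c 0 merged.length
    if 0 < lo ∧ c ≤ ends.getD (lo - 1) 0 then count + 1 else count) 0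

-- ===== PRECONDITION & SPEC =====
def Spec_count_candidates_in_ranges (candidates : List Int) (optimized_ranges : List (Int × Int)) (out : Int) : Prop := out = count_candidates_in_ranges_alt candidates optimized_ranges
instance (candidates : List Int) (optimized_ranges : List (Int × Int)) (out : Int) : Decidable (Spec_count_candidates_in_ranges candidates optimized_ranges out) := by unfold Spec_count_candidates_in_ranges; infer_instance

-- ===== CLAIM (what is proved, stated in full; the proofs are below) =====
def Claim_equal_count_candidates_in_ranges : Prop := ∀ (candidates : List Int) (optimized_ranges : List (Int × Int)), Dom_count_candidates_in_ranges candidates optimized_ranges → Spec_count_candidates_in_ranges candidates optimized_ranges (count_candidates_in_ranges candidates optimized_ranges)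

-- ===== LEMMAS AND PROOFS =====

-- 'c lies in some range of rs'
def pvHit (c : Int) (rs : List (Int × Int)) : Prop := ∃ p ∈ rs, p.1 ≤ c ∧ c ≤ p.2

theorem pvInAny_iff (c : Int) (rs : List (Int × Int)) : pvInAny c rs = true ↔ pvHit c rs := by
  induction rs with
  | nil => simp [pvInAny, pvHit]
  | cons p rest ih =>
    obtain ⟨s, e⟩ := p
    by_cases h : s ≤ c ∧ c ≤ e
    · simp [pvInAny, pvHit, h]
    · simp [pvInAny, pvHit, h] at ih ⊢
      tauto

-- binary-search invariant: boundary facts about the returned index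
theorem pvBisect_spec (starts : List Int) (c : Int) :
    ∀ fuel lo hi, hi - lo ≤ fuel → lo ≤ hi → hi ≤ starts.length →
    (0 < lo → starts.getD (lo - 1) 0 ≤ c) →
    (hi < starts.length → c < starts.getD hi 0) →
    lo ≤ pvBisect starts c lo hi ∧ pvBisect starts c lo hi ≤ hi ∧
    (0 < pvBisect starts c lo hi → starts.getD (pvBisect starts c lo hi - 1) 0 ≤ c) ∧
    (pvBisect starts c lo hi < starts.length → c < starts.getD (pvBisect starts c lo hi) 0) := by
  intro fuel
  induction fuel with
  | zero =>
    intro lo hi hfuel hlh hhl hlow hhigh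
    have : lo = hi := by omega
    subst this
    rw [pvBisect]; simp; exact ⟨hlow, hhigh⟩
  | succ n ih =>
    intro lo hi hfuel hlh hhl hlow hhigh
    rw [pvBisect]
    by_cases h : lo < hi
    · simp only [h, if_true]
      by_cases hm : starts.getD ((lo + hi) / 2) 0 ≤ c
      · simp only [hm, if_true]
        exact And.imp (by omega) id
          (ih ((lo + hi) / 2 + 1) hi (by omega) (by omega) hhl (by intro _; simpa using hm) hhigh)
      · simp only [hm, if_false]
        refine And.imp id (And.imp (by omega) id)
          (ih lo ((lo + hi) / 2) (by omega) (by omega) (by omega) hlow ?_)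
        intro _; exact lt_of_not_ge hm
    · simp only [h, if_false]
      have : lo = hi := by omega
      subst this
      exact ⟨le_refl _, le_refl _, hlow, hhigh⟩

-- the merged list is 'good': starts nondecreasing and a gap between consecutive intervals
def pvGood (ms : List (Int × Int)) : Prop :=
  ms.Pairwise (fun p q => p.2 < q.1 ∧ p.1 ≤ q.1)

-- merge-loop invariant
theorem pvHit_nil (c : Int) : pvHit c [] ↔ False := by simp [pvHit]

theorem pvHit_append (c : Int) (xs ys : List (Int × Int)) :
    pvHit c (xs ++ ys) ↔ pvHit c xs ∨ pvHit c ys := by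
  constructor
  · rintro ⟨p, hp, h⟩
    rcases List.mem_append.mp hp with hp | hp
    · exact Or.inl ⟨p, hp, h⟩
    · exact Or.inr ⟨p, hp, h⟩
  · rintro (⟨p, hp, h⟩ | ⟨p, hp, h⟩)
    · exact ⟨p, List.mem_append.mpr (Or.inl hp), h⟩
    · exact ⟨p, List.mem_append.mpr (Or.inr hp), h⟩

theorem pvHit_cons (c : Int) (p : Int × Int) (xs : List (Int × Int)) :
    pvHit c (p :: xs) ↔ (p.1 ≤ c ∧ c ≤ p.2) ∨ pvHit c xs := by
  constructor
  · rintro ⟨q, hq, h⟩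
    rcases List.mem_cons.mp hq with hq | hq
    · subst hq; exact Or.inl h
    · exact Or.inr ⟨q, hq, h⟩
  · rintro (h | ⟨q, hq, h⟩)
    · exact ⟨p, List.mem_cons_self, h⟩
    · exact ⟨q, List.mem_cons_of_mem _ hq, h⟩

theorem pvHit_singleton (c : Int) (p : Int × Int) :
    pvHit c [p] ↔ (p.1 ≤ c ∧ c ≤ p.2) := by
  rw [pvHit_cons, pvHit_nil]; tauto

theorem pvGood_snoc (xs : List (Int × Int)) (p : Int × Int) :
    pvGood (xs ++ [p]) ↔ pvGood xs ∧ ∀ r ∈ xs, r.2 < p.1 ∧ r.1 ≤ p.1 := by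
  simp [pvGood, List.pairwise_append]

theorem pvMerge_invariant (rest : List (Int × Int)) :
    ∀ cur merged,
    rest.Pairwise (fun p q => p.1 ≤ q.1) →
    (∀ q ∈ rest, ∀ p ∈ pvFinish (cur, merged), p.1 ≤ q.1) →
    pvGood (pvFinish (cur, merged)) →
    (cur = none → merged = []) →
    pvGood (pvFinish (rest.foldl pvMergeStep (cur, merged))) ∧
    (∀ c, pvHit c (pvFinish (rest.foldl pvMergeStep (cur, merged))) ↔
          pvHit c (pvFinish (cur, merged)) ∨ pvHit c rest) := by
  induction rest with
  | nil =>
    intro cur merged _ _ hg _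
    refine ⟨hg, fun c => ?_⟩
    rw [List.foldl_nil, pvHit_nil]
    tauto
  | cons p rest ih =>
    intro cur merged hsort hbound hg hnone
    have hsort' := (List.pairwise_cons.mp hsort).2
    have hple : ∀ q ∈ rest, p.1 ≤ q.1 := (List.pairwise_cons.mp hsort).1
    rw [List.foldl_cons]
    match cur with
    | none =>
      have hm0 : merged = [] := hnone rfl
      subst hm0
      have step : pvMergeStep ((none : Option (Int × Int)), ([] : List (Int × Int))) p = (some p, []) := by
        rfl
      rw [step]
      have hrec := ih (some p) [] hsort'
        (by intro q hq r hr; simp [pvFinish] at hr; subst hr; exact hple q hq)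
        (by simp [pvFinish, pvGood]) (by simp)
      refine ⟨hrec.1, fun c => ?_⟩
      rw [hrec.2 c]
      show pvHit c ([] ++ [p]) ∨ _ ↔ pvHit c (pvFinish (none, [])) ∨ _
      rw [List.nil_append, pvHit_singleton, pvHit_cons]
      show _ ↔ pvHit c [] ∨ _
      rw [pvHit_nil]
      tauto
    | some (cs, ce) =>
      have hfin : pvFinish (some (cs, ce), merged) = merged ++ [(cs, ce)] := rfl
      have hcsp : cs ≤ p.1 := by
        have := hbound p List.mem_cons_self (cs, ce) (by rw [hfin]; simp)
        simpa using this
      have hold := (pvGood_snoc merged (cs, ce)).mp (by rw [← hfin]; exact hg)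
      by_cases h1 : p.1 ≤ ce
      · by_cases h2 : p.2 > ce
        · have step : pvMergeStep (some (cs, ce), merged) p = (some (cs, p.2), merged) := by
            simp [pvMergeStep, h1, h2]
          rw [step]
          have hrec := ih (some (cs, p.2)) merged hsort'
            (by intro q hq r hr
                simp only [pvFinish, List.mem_append, List.mem_singleton] at hr
                rcases hr with hr | hr
                · exact hbound q (List.mem_cons_of_mem _ hq) r (by rw [hfin]; simp [hr])
                · subst hr; exact le_trans hcsp (hple q hq))
            (by show pvGood (merged ++ [(cs, p.2)])
                rw [pvGood_snoc]
                exact ⟨hold.1, fun r hr => (hold.2 r hr).imp id id⟩)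
            (by simp)
          refine ⟨hrec.1, fun c => ?_⟩
          rw [hrec.2 c]
          show pvHit c (merged ++ [(cs, p.2)]) ∨ _ ↔ pvHit c (merged ++ [(cs, ce)]) ∨ _
          rw [pvHit_append, pvHit_append, pvHit_singleton, pvHit_singleton, pvHit_cons]
          have key : ((cs, p.2).1 ≤ c ∧ c ≤ (cs, p.2).2) ↔
              (((cs, ce).1 ≤ c ∧ c ≤ (cs, ce).2) ∨ (p.1 ≤ c ∧ c ≤ p.2)) := by
            simp only []
            omega
          rw [key]
          tauto
        · have step : pvMergeStep (some (cs, ce), merged) p = (some (cs, ce), merged) := by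
            simp [pvMergeStep, h1, h2]
          rw [step]
          have hrec := ih (some (cs, ce)) merged hsort'
            (by intro q hq r hr; exact hbound q (List.mem_cons_of_mem _ hq) r hr)
            hg (by simp)
          refine ⟨hrec.1, fun c => ?_⟩
          rw [hrec.2 c]
          show pvHit c (merged ++ [(cs, ce)]) ∨ _ ↔ pvHit c (merged ++ [(cs, ce)]) ∨ _
          rw [pvHit_append, pvHit_singleton, pvHit_cons]
          have key : (p.1 ≤ c ∧ c ≤ p.2) → ((cs, ce).1 ≤ c ∧ c ≤ (cs, ce).2) := by
            simp only []
            omega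
          tauto
      · have step : pvMergeStep (some (cs, ce), merged) p = (some p, merged ++ [(cs, ce)]) := by
          simp [pvMergeStep, h1]
        rw [step]
        have hrec := ih (some p) (merged ++ [(cs, ce)]) hsort'
          (by intro q hq r hr
              simp only [pvFinish, List.mem_append, List.mem_singleton] at hr
              rcases hr with (hr | hr) | hr
              · exact hbound q (List.mem_cons_of_mem _ hq) r (by rw [hfin]; simp [hr])
              · subst hr; exact hbound q (List.mem_cons_of_mem _ hq) (cs, ce) (by rw [hfin]; simp)
              · subst hr; exact hple q hq)
          (by show pvGood ((merged ++ [(cs, ce)]) ++ [p])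
              rw [pvGood_snoc]
              refine ⟨by rw [← hfin]; exact hg, ?_⟩
              intro r hr
              rcases List.mem_append.mp hr with hr | hr
              · have := hold.2 r hr
                constructor <;> omega
              · rcases List.mem_singleton.mp hr with rfl
                constructor <;> omega)
          (by simp)
        refine ⟨hrec.1, fun c => ?_⟩
        rw [hrec.2 c]
        show pvHit c ((merged ++ [(cs, ce)]) ++ [p]) ∨ _ ↔ pvHit c (merged ++ [(cs, ce)]) ∨ _
        rw [pvHit_append, pvHit_append, pvHit_singleton, pvHit_singleton, pvHit_cons]
        exact or_assoc

-- a good list answers membership through the binary search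
theorem pvGood_search (ms : List (Int × Int)) (c : Int) (hg : pvGood ms) :
    (0 < pvBisect (ms.map Prod.fst) c 0 ms.length ∧
     c ≤ (ms.map Prod.snd).getD (pvBisect (ms.map Prod.fst) c 0 ms.length - 1) 0) ↔ pvHit c ms := by
  set starts := ms.map Prod.fst with hstarts
  set i := pvBisect starts c 0 ms.length with hi
  have hlen : starts.length = ms.length := by rw [hstarts]; exact List.length_map ..
  have hspec := pvBisect_spec starts c ms.length 0 ms.length (by omega) (by omega)
    (by omega) (by omega) (by intro h; omega)
  obtain ⟨-, hile, hlow, hhigh⟩ := hspec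
  have hgetS : ∀ j, (hj : j < ms.length) → starts.getD j 0 = (ms[j]'hj).1 := by
    intro j hj
    rw [hstarts, List.getD_eq_getElem _ _ (by simpa using hj), List.getElem_map]
  have hgetE : ∀ j, (hj : j < ms.length) → (ms.map Prod.snd).getD j 0 = (ms[j]'hj).2 := by
    intro j hj
    rw [List.getD_eq_getElem _ _ (by simpa using hj), List.getElem_map]
  have hpw := (List.pairwise_iff_getElem).mp hg
  constructor
  · rintro ⟨hi0, hce⟩
    have hn : 0 < ms.length := by omega
    have him : i - 1 < ms.length := by omega
    refine ⟨ms[i-1], List.getElem_mem him, ?_, ?_⟩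
    · have := hlow hi0
      rwa [hgetS (i-1) him] at this
    · rwa [hgetE (i-1) him] at hce
  · rintro ⟨⟨a, b⟩, hmem, hac, hcb⟩
    obtain ⟨j, hj, hjeq⟩ := List.mem_iff_getElem.mp hmem
    have hji : j < i := by
      by_contra hcon
      have hiltn : i < ms.length := by omega
      have h1 : c < starts.getD i 0 := hhigh (by omega)
      rw [hgetS i hiltn] at h1
      have h2 : (ms[i]'hiltn).1 ≤ (ms[j]'hj).1 := by
        rcases Nat.lt_or_ge i j with h | h
        · exact (hpw i j hiltn hj h).2
        · have : i = j := by omega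
          subst this; exact le_refl _
      rw [hjeq] at h2
      simp at h2
      omega
    have hi0 : 0 < i := by omega
    have him : i - 1 < ms.length := by omega
    have hjeq' : j = i - 1 := by
      by_contra hcon
      have hjlt : j < i - 1 := by omega
      have := (hpw j (i-1) hj him hjlt).1
      rw [hjeq] at this
      simp at this
      have h1 := hlow hi0
      rw [hgetS (i-1) him] at h1
      omega
    subst hjeq'
    refine ⟨hi0, ?_⟩
    rw [hgetE (i-1) him, hjeq]
    exact hcb

-- equal booleans pointwise give equal counting folds
theorem pvFoldl_count_congr (P Q : Int → Prop) [DecidablePred P] [DecidablePred Q]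
    (h : ∀ c, P c ↔ Q c) (xs : List Int) :
    ∀ acc : Int, xs.foldl (fun a c => if P c then a + 1 else a) acc =
    xs.foldl (fun a c => if Q c then a + 1 else a) acc := by
  induction xs with
  | nil => intro acc; rfl
  | cons x t ih =>
    intro acc
    rw [List.foldl_cons, List.foldl_cons, if_congr (h x) rfl rfl, ih]

-- ===== VERDICT (by name: the statement is the Claim_ definition above) =====
theorem count_candidates_in_ranges_spec : Claim_equal_count_candidates_in_ranges := by
  intro candidates optimized_ranges _
  unfold Spec_count_candidates_in_ranges count_candidates_in_ranges count_candidates_in_ranges_alt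
  simp only []
  apply pvFoldl_count_congr
  intro c
  set rs := PySem.List.sorted optimized_ranges (fun p => p.1) false with hrs
  set merged := pvFinish (rs.foldl pvMergeStep (none, [])) with hmerged
  have hinv := pvMerge_invariant rs none []
    (by rw [hrs]; exact PySem.List.sorted_pairwise ..)
    (by intro q _ r hr; simp [pvFinish] at hr)
    (by simp [pvFinish, pvGood]) (fun _ => rfl)
  have hgood : pvGood merged := hinv.1
  have hunion : pvHit c merged ↔ pvHit c rs := by
    rw [hmerged, hinv.2 c]
    show pvHit c [] ∨ _ ↔ _
    rw [pvHit_nil]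
    tauto
  rw [pvInAny_iff, pvGood_search merged c hgood, hunion]
  constructor
  · rintro ⟨p, hp, h⟩
    exact ⟨p, (PySem.List.sorted_perm ..).mem_iff.mpr hp, h⟩
  · rintro ⟨p, hp, h⟩
    exact ⟨p, (PySem.List.sorted_perm ..).mem_iff.mp hp, h⟩
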